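-- pv_equiv track=rewrite | github.com/CptConstantine/RoleByPost | rpg_systems/mgt2e/mgt2e_sheet.py | get_trained_skills
-- ===== SOURCE A (Python) =====
-- def get_trained_skills(skills: dict) -> dict:
--     """
--     Returns a dict of all trained skills and specialties (value may be 0 or higher).
--     If a skill or any of its specialties is >= 0, all specialties and the base skill are trained.
--     """
--     trained_groups = set()
--     # Step 1: Find all skill groups with any specialty at >= 0
--     for skill_name, value in skills.items():
--         if "(" in skill_name and ")" in skill_name and value >= 0:
--             group = skill_name.split("(", 1)[0].strip()
--             trained_groups.add(group)
--     # Also, if a non-specialty skill is >= 0, it's trained (and so are its specialties)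
--     for skill_name, value in skills.items():
--         if "(" not in skill_name and value >= 0:
--             trained_groups.add(skill_name.strip())
--
--     trained_skills = {}
--     for skill_name, value in skills.items():
--         # Specialties: trained if group is trained
--         if "(" in skill_name and ")" in skill_name:
--             group = skill_name.split("(", 1)[0].strip()
--             if group in trained_groups:
--                 trained_skills[skill_name] = value
--         # Non-specialty: trained if in trained_groups
--         elif skill_name in trained_groups:
--             trained_skills[skill_name] = value
--     return trained_skills
-- ===== SOURCE B (Python) =====
-- def get_trained_skills(skills: dict) -> dict:
--     """
--     Returns a dict of all trained skills and specialties (value may be 0 or higher).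
--     An entry is trained iff some entry of the same group has value >= 0; decided by
--     a direct scan of skills for each entry, with no precomputed trained-group set.
--     """
--     def key_of(name):
--         # The group a skill entry counts towards (None for '(' without ')').
--         if "(" in name and ")" in name:
--             return name.split("(", 1)[0].strip()
--         if "(" not in name:
--             return name.strip()
--         return None
--
--     def trained(group):
--         return any(value >= 0 and key_of(name) == group
--                    for name, value in skills.items())
--
--     return {name: value
--             for name, value in skills.items()
--             if trained(name.split("(", 1)[0].strip()
--                        if "(" in name and ")" in name else name)}
-- ===== Notes on version B (the rewrite author's own statement) =====
-- stated objective: simpler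
-- what changed: Removes A's precomputed trained-group set entirely: B decides each entry's inclusion by a direct any() scan over skills for an entry of the same group with value >= 0, so the output is a single dict comprehension with a nested existential scan instead of two set-building passes plus a filter pass.
import Mathlib
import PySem

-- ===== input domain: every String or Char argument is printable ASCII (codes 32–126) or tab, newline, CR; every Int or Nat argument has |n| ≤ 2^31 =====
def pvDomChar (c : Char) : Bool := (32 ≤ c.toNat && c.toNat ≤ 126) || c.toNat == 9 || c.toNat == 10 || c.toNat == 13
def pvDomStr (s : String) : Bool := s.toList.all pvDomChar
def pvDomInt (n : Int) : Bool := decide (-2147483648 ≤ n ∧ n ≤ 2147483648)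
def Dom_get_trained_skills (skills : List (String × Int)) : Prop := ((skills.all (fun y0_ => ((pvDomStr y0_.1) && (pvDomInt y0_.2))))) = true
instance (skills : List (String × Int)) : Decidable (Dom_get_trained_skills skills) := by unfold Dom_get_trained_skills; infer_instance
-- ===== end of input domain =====

-- B replaces A's precomputed trained-group set by a direct per-entry any() scan of the
-- whole skills dict (objective: simpler — no intermediate set, one comprehension).


-- shared helper: skill_name.split("(", 1)[0].strip()
def pvGroup (s : String) : String :=
  PySem.Str.strip (((PySem.Str.splitMax? s "(" 1).getD []).headD "")

-- ===== PORT A =====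
-- loop body of A's step 1: specialties with value >= 0 add their group
def pvStep1 (tg : PySem.Set String) (p : String × Int) : PySem.Set String :=
  if PySem.Str.isIn "(" p.1 && PySem.Str.isIn ")" p.1 && decide (0 ≤ p.2) then
    PySem.Set.add tg (pvGroup p.1) else tg

-- loop body of A's step 2: non-specialty skills with value >= 0 add their stripped name
def pvStep2 (tg : PySem.Set String) (p : String × Int) : PySem.Set String :=
  if !PySem.Str.isIn "(" p.1 && decide (0 ≤ p.2) then
    PySem.Set.add tg (PySem.Str.strip p.1) else tg

-- loop body of A's collection loop, over the finished trained_groups set tg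
def pvCollectA (tg : PySem.Set String) (d : PySem.Dict String Int) (p : String × Int) :
    PySem.Dict String Int :=
  if PySem.Str.isIn "(" p.1 && PySem.Str.isIn ")" p.1 then
    (if PySem.Set.contains tg (pvGroup p.1) then d.insert p.1 p.2 else d)
  else
    (if PySem.Set.contains tg p.1 then d.insert p.1 p.2 else d)

def get_trained_skills (skills : List (String × Int)) : List (String × Int) :=
  let tg1 : PySem.Set String := skills.foldl pvStep1 PySem.Set.empty
  let tg : PySem.Set String := skills.foldl pvStep2 tg1
  let ts : PySem.Dict String Int := skills.foldl (pvCollectA tg) PySem.Dict.empty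
  ts.items

-- ===== PORT B =====
-- key_of(name) from Source B: the group an entry counts towards (none for '(' without ')')
def pvKeyOf (name : String) : Option String :=
  if PySem.Str.isIn "(" name && PySem.Str.isIn ")" name then some (pvGroup name)
  else if !PySem.Str.isIn "(" name then some (PySem.Str.strip name)
  else none

-- trained(group) from Source B: any(value >= 0 and key_of(name) == group ...)
def pvTrained (skills : List (String × Int)) (g : String) : Bool :=
  skills.any (fun p => decide (0 ≤ p.2) && (pvKeyOf p.1 == some g))

-- the dict comprehension, as a fold of Dict.insert over skills.items()
def get_trained_skills_alt (skills : List (String × Int)) : List (String × Int) :=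
  (skills.foldl (fun d p =>
      if pvTrained skills
          (if PySem.Str.isIn "(" p.1 && PySem.Str.isIn ")" p.1 then pvGroup p.1 else p.1)
      then d.insert p.1 p.2 else d) (PySem.Dict.empty : PySem.Dict String Int)).items

-- ===== PRECONDITION & SPEC =====
def Spec_get_trained_skills (skills : List (String × Int)) (out : List (String × Int)) : Prop := out = get_trained_skills_alt skills
instance (skills : List (String × Int)) (out : List (String × Int)) : Decidable (Spec_get_trained_skills skills out) := by unfold Spec_get_trained_skills; infer_instance

-- ===== CLAIM (what is proved, stated in full; the proofs are below) =====
def Claim_equal_get_trained_skills : Prop := ∀ (skills : List (String × Int)), Dom_get_trained_skills skills → Spec_get_trained_skills skills (get_trained_skills skills)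

-- ===== LEMMAS AND PROOFS =====

theorem pvKeyOf_spec1 (s : String) (hL : PySem.Str.isIn "(" s = true)
    (hR : PySem.Str.isIn ")" s = true) : pvKeyOf s = some (pvGroup s) := by
  unfold pvKeyOf; rw [if_pos (by rw [hL, hR]; decide)]

theorem pvKeyOf_spec2 (s : String) (hL : PySem.Str.isIn "(" s = false) :
    pvKeyOf s = some (PySem.Str.strip s) := by
  unfold pvKeyOf
  rw [if_neg (by rw [hL]; simp), if_pos (by rw [hL]; rfl)]

theorem pvKeyOf_spec3 (s : String) (hL : PySem.Str.isIn "(" s = true)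
    (hR : PySem.Str.isIn ")" s = false) : pvKeyOf s = none := by
  unfold pvKeyOf
  rw [if_neg (by rw [hL, hR]; decide), if_neg (by rw [hL]; decide)]

-- generic: membership after a guarded Set.add fold
theorem pv_mem_foldl_add {α : Type} (c : α → Bool) (f : α → String) :
    ∀ (l : List α) (s : PySem.Set String) (g : String),
      g ∈ l.foldl (fun acc p => if c p then PySem.Set.add acc (f p) else acc) s ↔
        g ∈ s ∨ ∃ p ∈ l, c p = true ∧ f p = g := by
  intro l
  induction l with
  | nil => simp
  | cons q t ih =>
    intro s g
    simp only [List.foldl_cons, List.mem_cons]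
    rw [ih]
    by_cases hc : c q = true
    · rw [if_pos hc, PySem.Set.mem_add]
      constructor
      · rintro ((h | h) | h)
        · exact Or.inl h
        · exact Or.inr ⟨q, Or.inl rfl, hc, h.symm⟩
        · obtain ⟨p, hp, h1, h2⟩ := h
          exact Or.inr ⟨p, Or.inr hp, h1, h2⟩
      · rintro (h | ⟨p, (rfl | hp), h1, h2⟩)
        · exact Or.inl (Or.inl h)
        · exact Or.inl (Or.inr h2.symm)
        · exact Or.inr ⟨p, hp, h1, h2⟩
    · rw [if_neg hc]
      constructor
      · rintro (h | ⟨p, hp, h1, h2⟩)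
        · exact Or.inl h
        · exact Or.inr ⟨p, Or.inr hp, h1, h2⟩
      · rintro (h | ⟨p, (rfl | hp), h1, h2⟩)
        · exact Or.inl h
        · exact absurd h1 hc
        · exact Or.inr ⟨p, hp, h1, h2⟩

-- membership in A's finished trained_groups set: exactly "some entry counts towards g and is >= 0"
theorem pv_mem_tg (skills : List (String × Int)) (g : String) :
    g ∈ skills.foldl pvStep2 (skills.foldl pvStep1 PySem.Set.empty) ↔
      ∃ p ∈ skills, pvKeyOf p.1 = some g ∧ 0 ≤ p.2 := by
  unfold pvStep1 pvStep2
  rw [pv_mem_foldl_add, pv_mem_foldl_add]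
  constructor
  · rintro ((h0 | ⟨p, hp, hc, hf⟩) | ⟨p, hp, hc, hf⟩)
    · exact absurd h0 (List.not_mem_nil)
    · simp only [Bool.and_eq_true, decide_eq_true_eq] at hc
      exact ⟨p, hp, by rw [pvKeyOf_spec1 _ hc.1.1 hc.1.2, hf], hc.2⟩
    · simp only [Bool.and_eq_true, Bool.not_eq_true', decide_eq_true_eq] at hc
      exact ⟨p, hp, by rw [pvKeyOf_spec2 _ hc.1, hf], hc.2⟩
  · rintro ⟨p, hp, hk, hv⟩
    cases hL : PySem.Str.isIn "(" p.1 with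
    | false =>
      right
      rw [pvKeyOf_spec2 _ hL] at hk
      refine ⟨p, hp, ?_, Option.some.inj hk⟩
      simp only [Bool.and_eq_true, Bool.not_eq_true', decide_eq_true_eq]
      exact ⟨hL, hv⟩
    | true =>
      cases hR : PySem.Str.isIn ")" p.1 with
      | false => rw [pvKeyOf_spec3 _ hL hR] at hk; cases hk
      | true =>
        left; right
        rw [pvKeyOf_spec1 _ hL hR] at hk
        refine ⟨p, hp, ?_, Option.some.inj hk⟩
        simp only [Bool.and_eq_true, decide_eq_true_eq]
        exact ⟨⟨hL, hR⟩, hv⟩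

-- B's direct scan says "trained" exactly when some entry counts towards g and is >= 0
theorem pvTrained_iff (skills : List (String × Int)) (g : String) :
    pvTrained skills g = true ↔ ∃ p ∈ skills, pvKeyOf p.1 = some g ∧ 0 ≤ p.2 := by
  unfold pvTrained
  rw [List.any_eq_true]
  constructor
  · rintro ⟨p, hp, h⟩
    simp only [Bool.and_eq_true, decide_eq_true_eq, beq_iff_eq] at h
    exact ⟨p, hp, h.2, h.1⟩
  · rintro ⟨p, hp, hk, hv⟩
    refine ⟨p, hp, ?_⟩
    simp only [Bool.and_eq_true, decide_eq_true_eq, beq_iff_eq]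
    exact ⟨hv, hk⟩

-- A's finished set and B's scan agree on every key
theorem pv_contains_eq (skills : List (String × Int)) (x : String) :
    PySem.Set.contains (skills.foldl pvStep2 (skills.foldl pvStep1 PySem.Set.empty)) x =
      pvTrained skills x := by
  rcases Bool.eq_false_or_eq_true (pvTrained skills x) with h | h
  · rw [h]
    rw [PySem.Set.contains_iff, pv_mem_tg]
    exact (pvTrained_iff skills x).1 h
  · rw [h]
    apply Bool.eq_false_iff.2
    intro hct
    have hmem := (PySem.Set.contains_iff _ _).1 hct
    have hT := (pvTrained_iff skills x).2 ((pv_mem_tg skills x).1 hmem)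
    rw [h] at hT; cases hT

-- ===== VERDICT (by name: the statement is the Claim_ definition above) =====
theorem get_trained_skills_spec : Claim_equal_get_trained_skills := by
  intro skills _
  unfold Spec_get_trained_skills get_trained_skills get_trained_skills_alt
  simp only
  have hstep : pvCollectA (skills.foldl pvStep2 (skills.foldl pvStep1 PySem.Set.empty)) =
      (fun d p =>
        if pvTrained skills
            (if PySem.Str.isIn "(" p.1 && PySem.Str.isIn ")" p.1 then pvGroup p.1 else p.1)
        then d.insert p.1 p.2 else d) := by
    funext d p
    unfold pvCollectA
    by_cases hs : (PySem.Str.isIn "(" p.1 && PySem.Str.isIn ")" p.1) = true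
    · rw [if_pos hs, if_pos hs, pv_contains_eq]
    · rw [if_neg hs, if_neg hs, pv_contains_eq]
  rw [hstep]
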